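-- pv_equiv track=rewrite | github.com/ParagPat20/Precision-Land | scripts/log_download.py | first_missing_log_range
-- ===== SOURCE A (Python) =====
-- def first_missing_log_range(entries, expected):
--     if expected <= 0:
--         return None
--     start = -1
--     end = -1
--     for idx in range(expected):
--         if idx not in entries:
--             if start < 0:
--                 start = idx
--             else:
--                 end = idx
--         elif start >= 0:
--             break
--     if start < 0:
--         return None
--     if end < 0:
--         end = start
--     return start, end
-- ===== SOURCE B (Python) =====
-- def first_missing_log_range(entries, expected):
--     present = sorted({e for e in entries if 0 <= e < expected})
--     k = 0
--     while k < len(present) and present[k] == k: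
--         k += 1
--     if k >= expected:
--         return None
--     end = present[k] - 1 if k < len(present) else expected - 1
--     return k, end
-- ===== Notes on version B (the rewrite author's own statement) =====
-- stated objective: alternative
-- what changed: Replaces A's per-index linear membership scan over range(expected) with sort-and-scan: dedupe the in-range entries into a sorted list and walk it once, reporting the first position where the sorted value disagrees with its index; no membership tests remain, trading A's early exit for a full sort of the entries.
import Mathlib
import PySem

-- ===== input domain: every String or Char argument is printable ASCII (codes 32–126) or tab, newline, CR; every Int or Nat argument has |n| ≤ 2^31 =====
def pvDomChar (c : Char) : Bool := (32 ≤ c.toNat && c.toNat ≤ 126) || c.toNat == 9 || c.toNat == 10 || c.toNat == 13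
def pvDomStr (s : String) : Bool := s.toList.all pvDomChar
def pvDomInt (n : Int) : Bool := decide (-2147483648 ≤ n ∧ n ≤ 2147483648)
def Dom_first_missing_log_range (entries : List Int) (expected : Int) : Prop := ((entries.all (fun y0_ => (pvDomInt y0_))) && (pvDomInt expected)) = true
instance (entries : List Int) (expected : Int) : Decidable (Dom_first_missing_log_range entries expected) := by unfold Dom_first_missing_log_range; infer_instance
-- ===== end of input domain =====

-- B replaces A's per-index membership scan over range(expected) by sort-and-scan over the
-- deduped in-range entries (first position where sorted value ≠ index); a different algorithm of similar cost.


-- ===== PORT A =====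
-- A's for-loop with break, as structural recursion over the materialized range, same state (start, end)
def pvLoopA (entries : List Int) : List Int → Int → Int → Int × Int
  | [], start, end_ => (start, end_)
  | idx :: rest, start, end_ =>
    if ¬ entries.contains idx then
      if start < 0 then pvLoopA entries rest idx end_
      else pvLoopA entries rest start idx
    else if start ≥ 0 then (start, end_)   -- break
    else pvLoopA entries rest start end_

def first_missing_log_range (entries : List Int) (expected : Int) : Option (List Int) :=
  if expected ≤ 0 then none
  else
    let r := pvLoopA entries (PySem.List.pyRange 0 expected 1) (-1) (-1)
    if r.1 < 0 then none
    else some [r.1, if r.2 < 0 then r.1 else r.2]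

-- ===== PORT B =====
-- B's while-loop: walk the sorted present list while present[k] == k, then report
def pvScanB (expected : Int) : List Int → Int → Option (List Int)
  | [], k => if k ≥ expected then none else some [k, expected - 1]
  | p :: rest, k =>
    if p = k then pvScanB expected rest (k + 1)
    else if k ≥ expected then none else some [k, p - 1]

-- present = sorted({e for e in entries if 0 <= e < expected})
def first_missing_log_range_alt (entries : List Int) (expected : Int) : Option (List Int) :=
  let present := PySem.List.sorted
    (PySem.Set.ofList (entries.filter (fun e => decide (0 ≤ e ∧ e < expected)))) (fun x => x) false
  pvScanB expected present 0

-- ===== PRECONDITION & SPEC =====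
def Spec_first_missing_log_range (entries : List Int) (expected : Int) (out : Option (List Int)) : Prop := out = first_missing_log_range_alt entries expected
instance (entries : List Int) (expected : Int) (out : Option (List Int)) : Decidable (Spec_first_missing_log_range entries expected out) := by unfold Spec_first_missing_log_range; infer_instance

-- ===== CLAIM (what is proved, stated in full; the proofs are below) =====
def Claim_equal_first_missing_log_range : Prop := ∀ (entries : List Int) (expected : Int), Dom_first_missing_log_range entries expected → Spec_first_missing_log_range entries expected (first_missing_log_range entries expected)

-- ===== LEMMAS AND PROOFS =====

-- Proof-only reference: first missing index, and the extension of the run end.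
def pvFindStart (entries : List Int) : List Int → Option Int
  | [] => none
  | i :: r => if ¬ entries.contains i then some i else pvFindStart entries r

def pvExtendEnd (entries : List Int) (expected : Int) (e : Int) : Int :=
  if h : e + 1 < expected ∧ ¬ entries.contains (e + 1) then
    pvExtendEnd entries expected (e + 1)
  else e
termination_by (expected - e).toNat
decreasing_by omega

def pvRef (entries : List Int) (expected : Int) : Option (List Int) :=
  match pvFindStart entries (PySem.List.pyRange 0 expected 1) with
  | none => none
  | some start => some [start, pvExtendEnd entries expected start]

-- A's post-loop clean-up (start<0 → None; end<0 → end=start)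
def pvPost (p : Int × Int) : Option (List Int) :=
  if p.1 < 0 then none else some [p.1, if p.2 < 0 then p.1 else p.2]

-- Phase 2: after A has found the run start s, with effective end c and the range resuming at c+1,
-- A's remaining loop computes exactly (s, pvExtendEnd entries b c).
theorem pvLoopA_phase2 (entries : List Int) : ∀ (n : Nat) (a b s e' : Int),
    (b - a).toNat = n → 0 ≤ s → a = (if e' < 0 then s else e') + 1 →
    pvPost (pvLoopA entries (PySem.List.pyRange a b 1) s e')
      = some [s, pvExtendEnd entries b (if e' < 0 then s else e')] := by
  intro n
  induction n with
  | zero =>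
    intro a b s e' hn hs ha
    have hba : b ≤ a := by omega
    rw [PySem.List.pyRange_one_eq_nil hba, pvExtendEnd]
    rw [dif_neg (by omega)]
    simp [pvLoopA, pvPost]
    omega
  | succ n ih =>
    intro a b s e' hn hs ha
    have hab : a < b := by omega
    have hc : 0 ≤ (if e' < 0 then s else e') := by split <;> omega
    rw [PySem.List.pyRange_one_cons hab, pvExtendEnd]
    by_cases hmem : entries.contains a
    · -- a = c+1 present: A breaks; the while-condition fails
      rw [dif_neg (by rw [← ha]; tauto)]
      simp only [pvLoopA, hmem, not_true_eq_false, if_false, ge_iff_le, hs, if_true]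
      simp [pvPost]
      omega
    · -- a = c+1 missing: A extends end to a; the while-loop steps to e = a
      rw [dif_pos (by constructor <;> [omega; (rw [← ha]; exact hmem)])]
      have hsn : ¬ s < 0 := by omega
      simp only [pvLoopA, hmem, Bool.false_eq_true, not_false_eq_true, if_true, if_neg hsn]
      rw [← ha]
      have := ih (a+1) b s a (by omega) hs (by rw [if_neg (by omega)])
      rw [if_neg (by omega : ¬ (a : Int) < 0)] at this
      exact this

-- Phase 1: while no missing index was found, A just scans forward.
theorem pvLoopA_phase1 (entries : List Int) : ∀ (n : Nat) (a b : Int),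
    (b - a).toNat = n → 0 ≤ a →
    pvPost (pvLoopA entries (PySem.List.pyRange a b 1) (-1) (-1))
      = (match pvFindStart entries (PySem.List.pyRange a b 1) with
         | none => none
         | some s => some [s, pvExtendEnd entries b s]) := by
  intro n
  induction n with
  | zero =>
    intro a b hn _
    have hba : b ≤ a := by omega
    rw [PySem.List.pyRange_one_eq_nil hba]
    simp [pvLoopA, pvFindStart, pvPost]
  | succ n ih =>
    intro a b hn ha
    have hab : a < b := by omega
    rw [PySem.List.pyRange_one_cons hab]
    by_cases hmem : entries.contains a
    · simp only [pvLoopA, pvFindStart, hmem, not_true_eq_false, if_false, ge_iff_le]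
      rw [if_neg (by omega : ¬ (0:Int) ≤ -1)]
      exact ih (a+1) b (by omega) (by omega)
    · simp only [pvLoopA, pvFindStart, hmem]
      rw [if_pos (by omega : (-1:Int) < 0)]
      have := pvLoopA_phase2 entries (b - (a+1)).toNat (a+1) b a (-1) rfl ha
        (by rw [if_pos (by omega : (-1:Int) < 0)])
      rw [if_pos (by omega : (-1:Int) < 0)] at this
      exact this

theorem pvA_eq_ref (entries : List Int) (expected : Int) :
    first_missing_log_range entries expected = pvRef entries expected := by
  unfold first_missing_log_range pvRef
  by_cases h : expected ≤ 0
  · rw [if_pos h, PySem.List.pyRange_one_eq_nil h]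
    simp [pvFindStart]
  · rw [if_neg h]
    have := pvLoopA_phase1 entries (expected - 0).toNat 0 expected rfl le_rfl
    unfold pvPost at this
    simpa using this

-- pvExtendEnd when everything to the right up to expected is missing
theorem pvExtendEnd_all_missing (entries : List Int) : ∀ (n : Nat) (expected k : Int),
    (expected - k).toNat = n → k < expected →
    (∀ i : Int, k < i → i < expected → ¬ entries.contains i) →
    pvExtendEnd entries expected k = expected - 1 := by
  intro n
  induction n with
  | zero => intro expected k hn hk _; omega
  | succ n ih =>
    intro expected k hn hk hmiss
    rw [pvExtendEnd]
    by_cases h1 : k + 1 < expected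
    · rw [dif_pos ⟨h1, hmiss (k+1) (by omega) h1⟩]
      exact ih expected (k+1) (by omega) h1 (fun i h1 h2 => hmiss i (by omega) h2)
    · rw [dif_neg (by tauto)]; omega

-- pvExtendEnd when the next present value is p
theorem pvExtendEnd_upto (entries : List Int) : ∀ (n : Nat) (expected k p : Int),
    (p - k).toNat = n → k < p → p < expected → entries.contains p →
    (∀ i : Int, k < i → i < p → ¬ entries.contains i) →
    pvExtendEnd entries expected k = p - 1 := by
  intro n
  induction n with
  | zero => intro expected k p hn hk _ _ _; omega
  | succ n ih =>
    intro expected k p hn hk hp hpmem hmiss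
    rw [pvExtendEnd]
    by_cases h1 : k + 1 < p
    · rw [dif_pos ⟨by omega, hmiss (k+1) (by omega) h1⟩]
      exact ih expected (k+1) p (by omega) h1 hp hpmem (fun i h1 h2 => hmiss i (by omega) h2)
    · have hkp : k + 1 = p := by omega
      rw [dif_neg (by rw [hkp]; tauto)]; omega

-- B's scan over a strictly sorted remainder computes the reference, resuming at k
theorem pvScanB_eq_ref (entries : List Int) (expected : Int) : ∀ (rest : List Int) (k : Int),
    0 ≤ k → rest.Pairwise (· < ·) →
    (∀ i : Int, i ∈ rest ↔ k ≤ i ∧ i < expected ∧ entries.contains i) →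
    pvScanB expected rest k
      = (match pvFindStart entries (PySem.List.pyRange k expected 1) with
         | none => none
         | some s => some [s, pvExtendEnd entries expected s]) := by
  intro rest
  induction rest with
  | nil =>
    intro k hk _ hmem
    simp only [pvScanB]
    by_cases h : expected ≤ k
    · rw [if_pos (by omega), PySem.List.pyRange_one_eq_nil h]
      simp [pvFindStart]
    · have hkmiss : ¬ entries.contains k := fun hc =>
        (List.not_mem_nil (a := k)) ((hmem k).2 ⟨le_refl k, by omega, hc⟩)
      rw [if_neg (by omega), PySem.List.pyRange_one_cons (by omega)]
      simp only [pvFindStart]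
      rw [if_pos hkmiss]
      show some [k, expected - 1] = some [k, pvExtendEnd entries expected k]
      rw [pvExtendEnd_all_missing entries (expected - k).toNat expected k rfl (by omega)
        (fun i h1 h2 hc => (List.not_mem_nil (a := i)) ((hmem i).2 ⟨by omega, h2, hc⟩))]
  | cons p rest ih =>
    intro k hk hpw hmem
    have hp := (hmem p).1 (List.mem_cons_self)
    have hrest : ∀ i ∈ rest, p < i := fun i hi => (List.pairwise_cons.1 hpw).1 i hi
    simp only [pvScanB]
    by_cases hpk : p = k
    · rw [if_pos hpk]
      have hkmem : entries.contains k := hpk ▸ hp.2.2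
      rw [PySem.List.pyRange_one_cons (by omega)]
      simp only [pvFindStart, hkmem, not_true_eq_false, if_false]
      refine ih (k+1) (by omega) (List.pairwise_cons.1 hpw).2 (fun i => ⟨fun hi => ?_, fun hi => ?_⟩)
      · have := (hmem i).1 (List.mem_cons_of_mem p hi)
        exact ⟨by have := hrest i hi; omega, this.2.1, this.2.2⟩
      · have hm := (hmem i).2 ⟨by omega, hi.2.1, hi.2.2⟩
        rcases List.mem_cons.1 hm with h | h
        · omega
        · exact h
    · rw [if_neg hpk]
      have hkp : k < p := by omega
      have hnomid : ∀ i : Int, k ≤ i → i < p → ¬ entries.contains i := by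
        intro i h1 h2 hc
        have hm := (hmem i).2 ⟨h1, by omega, hc⟩
        rcases List.mem_cons.1 hm with h | h
        · omega
        · have := hrest i h; omega
      have hkmiss : ¬ entries.contains k := hnomid k le_rfl hkp
      rw [if_neg (by omega), PySem.List.pyRange_one_cons (by omega : k < expected)]
      simp only [pvFindStart]
      rw [if_pos hkmiss]
      show some [k, p - 1] = some [k, pvExtendEnd entries expected k]
      rw [pvExtendEnd_upto entries (p - k).toNat expected k p rfl hkp hp.2.1 hp.2.2
        (fun i h1 h2 => hnomid i (by omega) h2)]

theorem pvB_eq_ref (entries : List Int) (expected : Int) :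
    first_missing_log_range_alt entries expected = pvRef entries expected := by
  unfold first_missing_log_range_alt pvRef
  refine pvScanB_eq_ref entries expected _ 0 le_rfl ?_ ?_
  · exact PySem.List.sorted_ofList_pairwise_lt _
  · intro i
    rw [PySem.List.mem_sorted, PySem.Set.mem_ofList, List.mem_filter]
    constructor
    · rintro ⟨hi, hcond⟩
      have := of_decide_eq_true hcond
      exact ⟨this.1, this.2, List.contains_iff_mem.2 hi⟩
    · rintro ⟨h0, h1, hc⟩
      exact ⟨List.contains_iff_mem.1 hc, decide_eq_true ⟨h0, h1⟩⟩

-- ===== VERDICT (by name: the statement is the Claim_ definition above) =====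
theorem first_missing_log_range_spec : Claim_equal_first_missing_log_range := by
  intro entries expected _
  unfold Spec_first_missing_log_range
  rw [pvA_eq_ref, pvB_eq_ref]
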